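-- pv_equiv track=rewrite | github.com/nidepapa/algorithm-notebook | new.py | ConutAZ
-- ===== SOURCE A (Python) =====
-- def ConutAZ(s):
--     prefixA = [0] * len(s)
--     zcount = 0
--     res = 0
--     if s[0] == "A":
--         prefixA[0] = 1
--     elif s[0] == "Z":
--         zcount += 1
--     for i in range(1, len(s)):
--         prefixA[i] = prefixA[i - 1]
--         if s[i] == "A":
--             prefixA[i] += 1
--         elif s[i] == "Z":
--             zcount += 1
--     # choose A or Z
--     for i in range(1, len(s)):
--         if s[i] == "Z":
--             res += prefixA[i]
--     return res + max(prefixA[-1], zcount)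
-- ===== SOURCE B (Python) =====
-- def ConutAZ(s):
--     a = 1 if s[0] == "A" else 0
--     z = 1 if s[0] == "Z" else 0
--     res = 0
--     for c in s[1:]:
--         if c == "A":
--             a += 1
--         elif c == "Z":
--             z += 1
--             res += a
--     return res + max(a, z)
-- ===== Notes on version B (the rewrite author's own statement) =====
-- stated objective: simpler
-- what changed: Replaced the prefix-count array and two separate index loops by a single streaming pass carrying running A/Z counters and the result accumulator.
import Mathlib
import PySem

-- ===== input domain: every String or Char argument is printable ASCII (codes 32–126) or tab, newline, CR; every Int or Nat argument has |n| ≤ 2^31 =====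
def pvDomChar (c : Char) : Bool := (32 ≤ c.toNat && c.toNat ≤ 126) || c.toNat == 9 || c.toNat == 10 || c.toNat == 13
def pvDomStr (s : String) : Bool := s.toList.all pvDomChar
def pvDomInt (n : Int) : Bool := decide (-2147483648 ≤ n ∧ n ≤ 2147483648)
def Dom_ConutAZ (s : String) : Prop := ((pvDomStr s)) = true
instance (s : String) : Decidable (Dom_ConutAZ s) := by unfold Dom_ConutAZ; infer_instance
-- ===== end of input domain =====

-- B replaces A's prefix-count array and two index loops by one streaming pass; objective: simpler.

-- ===== PORT A =====
-- Literal port of A: prefix-A array built index by index, then a second index loop summing it at Z positions.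
def ConutAZ (s : String) : Int :=
  let cs := s.toList
  let n : Int := (cs.length : Int)
  match PySem.Str.pyGet? s 0 with
  | none => 0  -- s[0] raises IndexError on the empty string; excluded by Pre_ConutAZ
  | some c0 =>
    let prefixA0 : List Int := List.replicate cs.length 0
    let st0 : List Int × Int :=
      if c0 = 'A' then (PySem.List.pySetD prefixA0 0 1, 0)
      else if c0 = 'Z' then (prefixA0, 1)
      else (prefixA0, 0)
    let st := (PySem.List.pyRange 1 n 1).foldl
      (fun (st : List Int × Int) i =>
        let p := PySem.List.pySetD st.1 i (PySem.List.pyGetD st.1 (i - 1) 0)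
        if PySem.List.pyGetD cs i ' ' = 'A' then
          (PySem.List.pySetD p i (PySem.List.pyGetD p i 0 + 1), st.2)
        else if PySem.List.pyGetD cs i ' ' = 'Z' then (p, st.2 + 1)
        else (p, st.2)) st0
    let res := (PySem.List.pyRange 1 n 1).foldl
      (fun (r : Int) i =>
        if PySem.List.pyGetD cs i ' ' = 'Z' then r + PySem.List.pyGetD st.1 i 0 else r) 0
    res + max (PySem.List.pyGetD st.1 (-1) 0) st.2

-- ===== PORT B =====
-- Literal port of B: one streaming pass over s[1:] with running (a, z, res).
def ConutAZ_alt (s : String) : Int :=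
  match PySem.Str.pyGet? s 0 with
  | none => 0  -- s[0] raises IndexError on the empty string; excluded by Pre_ConutAZ
  | some c0 =>
    let a0 : Int := if c0 = 'A' then 1 else 0
    let z0 : Int := if c0 = 'Z' then 1 else 0
    let st := (s.toList.drop 1).foldl
      (fun (st : Int × Int × Int) c =>
        if c = 'A' then (st.1 + 1, st.2.1, st.2.2)
        else if c = 'Z' then (st.1, st.2.1 + 1, st.2.2 + st.1)
        else st) (a0, z0, 0)
    st.2.2 + max st.1 st.2.1

-- ===== PRECONDITION & SPEC =====
-- Pre_ excludes only the empty string, on which both A and B raise IndexError at s[0].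
def Pre_ConutAZ (s : String) : Prop := s.toList ≠ []
instance (s : String) : Decidable (Pre_ConutAZ s) := by unfold Pre_ConutAZ; infer_instance
def pvWitness_ConutAZ : String := "ZAxAZ"
def Spec_ConutAZ (s : String) (out : Int) : Prop := out = ConutAZ_alt s
instance (s : String) (out : Int) : Decidable (Spec_ConutAZ s out) := by unfold Spec_ConutAZ; infer_instance

-- ===== CLAIM (what is proved, stated in full; the proofs are below) =====
def Claim_equal_ConutAZ : Prop := ∀ (s : String), Dom_ConutAZ s → Pre_ConutAZ s → Spec_ConutAZ s (ConutAZ s)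

-- ===== LEMMAS AND PROOFS =====

def cntA (t : List Char) : Int := (t.countP (· = 'A') : Int)
def cntZ (t : List Char) : Int := (t.countP (· = 'Z') : Int)

def prefF (c0 : Char) (rest : List Char) (j : Nat) : Int :=
  (if c0 = 'A' then 1 else 0) + cntA (rest.take j)

def parr (c0 : Char) (rest : List Char) (m : Nat) : List Int :=
  (List.range (1 + rest.length)).map (fun j => if j < m + 1 then prefF c0 rest j else 0)

def S (a : Int) : List Char → Int
  | [] => 0
  | c :: t => if c = 'A' then S (a + 1) t else if c = 'Z' then a + S a t else S a t

-- B1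
lemma b1 (t : List Char) : ∀ (a z r : Int),
    t.foldl (fun (st : Int × Int × Int) c =>
        if c = 'A' then (st.1 + 1, st.2.1, st.2.2)
        else if c = 'Z' then (st.1, st.2.1 + 1, st.2.2 + st.1)
        else st) (a, z, r)
      = (a + cntA t, z + cntZ t, r + S a t) := by
  induction t with
  | nil => simp [cntA, cntZ, S]
  | cons c t ih =>
    intro a z r
    by_cases hA : c = 'A'
    · simp [hA, List.foldl_cons, ih, cntA, cntZ, S]
      ring
    · by_cases hZ : c = 'Z'
      · simp [hZ, List.foldl_cons, ih, cntA, cntZ, S]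
        constructor <;> ring
      · simp [hA, hZ, List.foldl_cons, ih, cntA, cntZ, S]

lemma cntA_take_succ (rest : List Char) (m : Nat) (h : m < rest.length) :
    cntA (rest.take (m + 1)) = cntA (rest.take m) + (if rest[m] = 'A' then 1 else 0) := by
  rw [cntA, List.take_add_one, List.getElem?_eq_getElem h]
  simp only [Option.toList_some, List.countP_append, List.countP_cons, List.countP_nil]
  rw [cntA]
  push_cast
  split <;> simp_all

lemma cntZ_take_succ (rest : List Char) (m : Nat) (h : m < rest.length) :
    cntZ (rest.take (m + 1)) = cntZ (rest.take m) + (if rest[m] = 'Z' then 1 else 0) := by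
  rw [cntZ, List.take_add_one, List.getElem?_eq_getElem h]
  simp only [Option.toList_some, List.countP_append, List.countP_cons, List.countP_nil]
  rw [cntZ]
  push_cast
  split <;> simp_all

lemma prefF_succ (c0 : Char) (rest : List Char) (m : Nat) (h : m < rest.length) :
    prefF c0 rest (m + 1) = prefF c0 rest m + (if rest[m] = 'A' then 1 else 0) := by
  simp [prefF, cntA_take_succ rest m h]; ring

lemma parr_getD (c0 : Char) (rest : List Char) (m j : Nat) (h : j < 1 + rest.length) :
    (parr c0 rest m).getD j 0 = if j < m + 1 then prefF c0 rest j else 0 := by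
  rw [parr, PySem.List.getD_map_range _ _ _ _ h]

lemma parr_length (c0 : Char) (rest : List Char) (m : Nat) :
    (parr c0 rest m).length = 1 + rest.length := by simp [parr]

lemma parr_set (c0 : Char) (rest : List Char) (m : Nat) (_h : m + 1 < 1 + rest.length) :
    (parr c0 rest m).set (m + 1) (prefF c0 rest (m + 1)) = parr c0 rest (m + 1) := by
  apply List.ext_getElem
  · simp [parr]
  · intro j hj1 hj2
    simp only [parr, List.getElem_set, List.getElem_map, List.getElem_range]
    by_cases hj : m + 1 = j
    · subst hj; simp
    · simp only [hj, if_false]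
      by_cases hlt : j < m + 1
      · simp [hlt, Nat.lt_succ_of_lt hlt]
      · have h2 : ¬ j < m + 2 := by omega
        simp [hlt, h2]

-- initial state of A's first loop equals parr _ _ 0
lemma init_state (c0 : Char) (rest : List Char) :
    (if c0 = 'A' then (PySem.List.pySetD (List.replicate (c0 :: rest).length 0) 0 1, (0:Int))
     else if c0 = 'Z' then (List.replicate (c0 :: rest).length (0:Int), (1:Int))
     else (List.replicate (c0 :: rest).length (0:Int), (0:Int)))
      = (parr c0 rest 0, if c0 = 'Z' then 1 else 0) := by
  have hset : ∀ (v0 : Int), (List.replicate (c0 :: rest).length (0:Int)).set 0 v0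
      = (List.range (1 + rest.length)).map (fun j => if j < 1 then v0 else 0) := by
    intro v0
    apply List.ext_getElem
    · simp; omega
    · intro j hj1 hj2
      cases j <;> simp
  have hparr : parr c0 rest 0
      = (List.range (1 + rest.length)).map
          (fun j => if j < 1 then (if c0 = 'A' then (1:Int) else 0) else 0) := by
    rw [parr]
    apply List.map_congr_left
    intro j hj
    by_cases hj1 : j < 1
    · interval_cases j
      simp [prefF, cntA]
    · simp [hj1]
  have hrepl : List.replicate (c0 :: rest).length (0:Int)
      = (List.range (1 + rest.length)).map (fun j => if j < 1 then (0:Int) else 0) := by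
    simpa using hset 0
  by_cases hA : c0 = 'A'
  · subst hA
    rw [if_pos rfl]
    have h0 : PySem.List.pySetD (List.replicate ('A' :: rest).length (0:Int)) 0 1
        = (List.replicate ('A' :: rest).length (0:Int)).set 0 1 := by
      simpa using PySem.List.pySetD_natCast (List.replicate ('A' :: rest).length (0:Int)) 0 1
    refine Prod.ext ?_ ?_
    · rw [h0, hset 1, hparr]
      simp
    · simp
  · rw [if_neg hA]
    by_cases hZ : c0 = 'Z'
    · rw [if_pos hZ]
      refine Prod.ext ?_ ?_
      · rw [hrepl, hparr]
        simp [hA]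
      · simp [hZ]
    · rw [if_neg hZ]
      refine Prod.ext ?_ ?_
      · rw [hrepl, hparr]
        simp [hA]
      · simp [hZ]

-- invariant of A's first index loop
lemma loop1 (c0 : Char) (rest : List Char) (z0 : Int) :
    ∀ m : Nat, m ≤ rest.length →
    (PySem.List.pyRange 1 (1 + (m:Int)) 1).foldl
      (fun (st : List Int × Int) i =>
        let p := PySem.List.pySetD st.1 i (PySem.List.pyGetD st.1 (i - 1) 0)
        if PySem.List.pyGetD (c0 :: rest) i ' ' = 'A' then
          (PySem.List.pySetD p i (PySem.List.pyGetD p i 0 + 1), st.2)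
        else if PySem.List.pyGetD (c0 :: rest) i ' ' = 'Z' then (p, st.2 + 1)
        else (p, st.2)) (parr c0 rest 0, z0)
    = (parr c0 rest m, z0 + cntZ (rest.take m)) := by
  intro m
  induction m with
  | zero =>
    intro _
    rw [show (1 + ((0:Nat):Int)) = 1 by norm_num, PySem.List.pyRange_one_eq_nil le_rfl]
    simp [cntZ]
  | succ m ih =>
    intro h
    have hm : m ≤ rest.length := by omega
    have hmL : m < rest.length := by omega
    rw [show (1 + ((m+1:Nat):Int)) = (1 + (m:Int)) + 1 by push_cast; ring,
        PySem.List.pyRange_one_succ_right (by omega), List.foldl_append, ih hm,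
        List.foldl_cons, List.foldl_nil]
    have hcast : (1:Int) + (m:Int) = ((m+1:Nat):Int) := by push_cast; ring
    have hgetm : PySem.List.pyGetD (parr c0 rest m) ((1:Int) + (m:Int) - 1) 0
        = prefF c0 rest m := by
      rw [show (1:Int) + (m:Int) - 1 = ((m:Nat):Int) by ring, PySem.List.pyGetD_natCast,
          parr_getD c0 rest m m (by omega)]
      simp
    have hsetp : PySem.List.pySetD (parr c0 rest m) ((1:Int) + (m:Int)) (prefF c0 rest m)
        = (parr c0 rest m).set (m+1) (prefF c0 rest m) := by
      rw [hcast, PySem.List.pySetD_natCast]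
    have hcs : PySem.List.pyGetD (c0 :: rest) ((1:Int) + (m:Int)) ' ' = rest[m] := by
      rw [hcast, PySem.List.pyGetD_natCast]
      simp [List.getElem?_eq_getElem hmL]
    simp only [hgetm, hsetp, hcs]
    by_cases hA : rest[m] = 'A'
    · rw [if_pos hA]
      have hplen : ((parr c0 rest m).set (m+1) (prefF c0 rest m)).length = 1 + rest.length := by
        rw [List.length_set, parr_length]
      have hget2 : PySem.List.pyGetD ((parr c0 rest m).set (m+1) (prefF c0 rest m))
          ((1:Int) + (m:Int)) 0 = prefF c0 rest m := by
        rw [hcast, PySem.List.pyGetD_natCast,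
            List.getD_eq_getElem _ _ (by rw [hplen]; omega)]
        simp
      rw [hget2, hcast, PySem.List.pySetD_natCast, List.set_set]
      have : prefF c0 rest m + 1 = prefF c0 rest (m+1) := by
        rw [prefF_succ c0 rest m hmL, if_pos hA]
      rw [this, parr_set c0 rest m (by omega)]
      have : cntZ (rest.take (m+1)) = cntZ (rest.take m) := by
        rw [cntZ_take_succ rest m hmL, if_neg (by simp [hA]), add_zero]
      rw [this]
    · rw [if_neg hA]
      by_cases hZ : rest[m] = 'Z'
      · rw [if_pos hZ]
        have h1 : prefF c0 rest m = prefF c0 rest (m+1) := by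
          rw [prefF_succ c0 rest m hmL, if_neg hA, add_zero]
        rw [h1, parr_set c0 rest m (by omega),
            cntZ_take_succ rest m hmL, if_pos hZ]
        simp [add_assoc]
      · rw [if_neg hZ]
        have h1 : prefF c0 rest m = prefF c0 rest (m+1) := by
          rw [prefF_succ c0 rest m hmL, if_neg hA, add_zero]
        rw [h1, parr_set c0 rest m (by omega),
            cntZ_take_succ rest m hmL, if_neg hZ]
        simp

-- A's second index loop computes B's streaming res
lemma loop2 (c0 : Char) (rest : List Char) :
    ∀ (d k : Nat), k + d = rest.length → ∀ (r : Int),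
    (PySem.List.pyRange (1 + (k:Int)) (1 + (rest.length:Int)) 1).foldl
      (fun (r : Int) i =>
        if PySem.List.pyGetD (c0 :: rest) i ' ' = 'Z'
        then r + PySem.List.pyGetD (parr c0 rest rest.length) i 0 else r) r
    = r + S (prefF c0 rest k) (rest.drop k) := by
  intro d
  induction d with
  | zero =>
    intro k hk r
    rw [PySem.List.pyRange_one_eq_nil (by omega)]
    rw [show k = rest.length by omega]
    simp [S]
  | succ d ih =>
    intro k hk r
    have hkL : k < rest.length := by omega
    rw [PySem.List.pyRange_one_cons (by omega), List.foldl_cons]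
    have hcast : (1:Int) + (k:Int) = ((k+1:Nat):Int) := by push_cast; ring
    have hcs : PySem.List.pyGetD (c0 :: rest) ((1:Int) + (k:Int)) ' ' = rest[k] := by
      rw [hcast, PySem.List.pyGetD_natCast]
      simp [List.getElem?_eq_getElem hkL]
    have hP : PySem.List.pyGetD (parr c0 rest rest.length) ((1:Int) + (k:Int)) 0
        = prefF c0 rest (k+1) := by
      rw [hcast, PySem.List.pyGetD_natCast, parr_getD c0 rest rest.length (k+1) (by omega)]
      simp [Nat.lt_succ_of_le hkL]
    have hdrop : rest.drop k = rest[k] :: rest.drop (k+1) := by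
      rw [List.getElem_cons_drop]
    have hrange : (1:Int) + (k:Int) + 1 = 1 + ((k+1:Nat):Int) := by push_cast; ring
    rw [hcs, hP, hdrop, hrange]
    by_cases hA : rest[k] = 'A'
    · rw [if_neg (by simp [hA]), ih (k+1) (by omega) r]
      rw [show S (prefF c0 rest k) (rest[k] :: rest.drop (k+1))
            = S (prefF c0 rest k + 1) (rest.drop (k+1)) by rw [S, if_pos hA],
          show prefF c0 rest k + 1 = prefF c0 rest (k+1) by
            rw [prefF_succ c0 rest k hkL, if_pos hA]]
    · by_cases hZ : rest[k] = 'Z'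
      · rw [if_pos hZ, ih (k+1) (by omega) (r + prefF c0 rest (k+1))]
        rw [show S (prefF c0 rest k) (rest[k] :: rest.drop (k+1))
              = prefF c0 rest k + S (prefF c0 rest k) (rest.drop (k+1)) by
            rw [S, if_neg (by simp [hZ]), if_pos hZ],
            show prefF c0 rest k = prefF c0 rest (k+1) by
              rw [prefF_succ c0 rest k hkL, if_neg hA, add_zero]]
        ring
      · rw [if_neg hZ, ih (k+1) (by omega) r]
        rw [show S (prefF c0 rest k) (rest[k] :: rest.drop (k+1))
              = S (prefF c0 rest k) (rest.drop (k+1)) by rw [S, if_neg hA, if_neg hZ],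
            show prefF c0 rest k = prefF c0 rest (k+1) by
              rw [prefF_succ c0 rest k hkL, if_neg hA, add_zero]]


theorem main (s : String) (h : s.toList ≠ []) : ConutAZ s = ConutAZ_alt s := by
  obtain ⟨c0, rest, hlist⟩ : ∃ c0 rest, s.toList = c0 :: rest := by
    cases hl : s.toList with
    | nil => exact absurd hl h
    | cons c t => exact ⟨c, t, rfl⟩
  have hget : PySem.Str.pyGet? s 0 = some c0 := by
    simp [PySem.Str.pyGet?, hlist, PySem.List.pyGet?, PySem.List.pyIdx?]
  rw [ConutAZ, ConutAZ_alt, hget, hlist]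
  simp only []
  have hn : (((c0 :: rest).length : Nat) : Int) = 1 + ((rest.length : Nat):Int) := by simp; ring
  rw [hn, init_state c0 rest, loop1 c0 rest _ rest.length le_rfl]
  have hdrop : List.drop 1 (c0 :: rest) = rest := rfl
  rw [hdrop, b1 rest (if c0 = 'A' then 1 else 0) (if c0 = 'Z' then 1 else 0) 0]
  rw [List.take_length]
  -- second loop via loop2 at k = 0
  have hl2 := loop2 c0 rest rest.length 0 (by omega) 0
  rw [show ((1:Int) + ((0:Nat):Int)) = 1 by norm_num] at hl2
  rw [show (parr c0 rest rest.length, (if c0 = 'Z' then (1:Int) else 0) + cntZ rest).1 = parr c0 rest rest.length from rfl] at *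
  rw [hl2]
  have hpref0 : prefF c0 rest 0 = (if c0 = 'A' then 1 else 0) := by
    simp [prefF, cntA]
  -- last element of the prefix array
  have hlast : PySem.List.pyGetD (parr c0 rest rest.length) (-1) 0
      = (if c0 = 'A' then 1 else 0) + cntA rest := by
    rw [PySem.List.pyGetD_neg_ofNat (parr c0 rest rest.length) 1 0 (by norm_num) (by rw [parr_length]; omega)]
    simp only [parr, List.getElem_map, List.getElem_range, List.length_map, List.length_range]
    rw [if_pos (by omega), prefF, show 1 + rest.length - 1 = rest.length by omega]
    simp
  rw [hlast, hpref0]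
  simp

-- ===== VERDICT (by name: the statement is the Claim_ definition above) =====
theorem ConutAZ_spec : Claim_equal_ConutAZ := by
  intro s _ hpre
  show ConutAZ s = ConutAZ_alt s
  exact main s hpre
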